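-- pv_equiv track=rewrite | github.com/marellanoc/USM-TEL341-RIFECO-project | proyecto_simula.py | get_counterclockwise_routes
-- ===== SOURCE A (Python) =====
-- def get_counterclockwise_routes(i, j, n):
--     counterclockwise_routes_list = []
--     k = i
--     overclock = False
--
--     if (j < i):
--         while (k > j):
--             k -= 1
--             counterclockwise_routes_list.append(k)
--
--     else:
--         while (k > j or not overclock):
--             k -= 1
--             if k < 0:
--                 k = n - 1
--                 overclock = True
--             counterclockwise_routes_list.append(k)
--
--     return counterclockwise_routes_list
-- ===== SOURCE B (Python) =====
-- def get_counterclockwise_routes(i, j, n):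
--     # Counterclockwise path as plain descending ranges instead of a stateful
--     # while loop with a wraparound flag: either straight down i-1..j, or down
--     # to 0, wrap to n-1, then down to j.
--     if j < i:
--         return list(range(i - 1, j - 1, -1))
--     return list(range(i - 1, -1, -1)) + [n - 1] + list(range(n - 2, j - 1, -1))
-- ===== Notes on version B (the rewrite author's own statement) =====
-- stated objective: simpler
-- what changed: Replaces A's stateful while-loops with an 'overclock' wraparound flag by a branch returning plain descending ranges (i-1..j, or i-1..0 then the wrap index n-1 then n-2..j); the range objects are materialised in C rather than appended one element at a time.
import Mathlib
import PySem

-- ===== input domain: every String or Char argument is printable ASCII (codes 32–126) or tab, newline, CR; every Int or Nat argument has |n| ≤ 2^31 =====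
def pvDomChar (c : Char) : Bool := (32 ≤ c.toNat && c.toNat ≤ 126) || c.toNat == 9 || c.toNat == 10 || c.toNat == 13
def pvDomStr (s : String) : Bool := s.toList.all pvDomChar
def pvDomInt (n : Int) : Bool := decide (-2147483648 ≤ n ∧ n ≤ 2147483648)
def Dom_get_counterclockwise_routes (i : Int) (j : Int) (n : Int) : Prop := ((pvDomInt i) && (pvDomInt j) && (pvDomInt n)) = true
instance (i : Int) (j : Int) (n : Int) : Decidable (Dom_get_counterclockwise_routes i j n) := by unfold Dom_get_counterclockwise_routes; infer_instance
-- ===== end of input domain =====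

-- B replaces A's stateful while-loops with an 'overclock' flag by plain
-- descending ranges (simpler; same cost).

-- ===== PORT A =====
-- while (k > j): k -= 1; append k      (fuel only makes the recursion total)
def pvLoopA1 : Nat → Int → Int → List Int → List Int
  | 0, _, _, acc => acc
  | f + 1, k, j, acc => if j < k then pvLoopA1 f (k - 1) j (acc ++ [k - 1]) else acc

-- while (k > j or not overclock): k -= 1; if k < 0: k = n-1; overclock = True; append k
def pvLoopA2 : Nat → Int → Int → Int → Bool → List Int → List Int
  | 0, _, _, _, _, acc => acc
  | f + 1, k, j, n, oc, acc =>
    if j < k || !oc then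
      if k - 1 < 0 then pvLoopA2 f (n - 1) j n true (acc ++ [n - 1])
      else pvLoopA2 f (k - 1) j n oc (acc ++ [k - 1])
    else acc

def get_counterclockwise_routes (i : Int) (j : Int) (n : Int) : List Int :=
  if j < i then pvLoopA1 (i - j).toNat i j []
  else pvLoopA2 (i.toNat + (n - j).toNat + 1) i j n false []

-- ===== PORT B =====
def get_counterclockwise_routes_alt (i : Int) (j : Int) (n : Int) : List Int :=
  if j < i then PySem.List.pyRange (i - 1) (j - 1) (-1)
  else PySem.List.pyRange (i - 1) (-1) (-1) ++ [n - 1] ++ PySem.List.pyRange (n - 2) (j - 1) (-1)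

-- ===== PRECONDITION & SPEC =====
-- Pre_ excludes exactly the inputs (i ≤ j ∧ j < 0 ∧ j < n - 1) on which A's
-- wrap branch LOOPS FOREVER (k keeps resetting to n-1 and never reaches j);
-- A returns no value there. On every input where A returns, Pre_ holds.
def Pre_get_counterclockwise_routes (i : Int) (j : Int) (n : Int) : Prop :=
  j < i ∨ 0 ≤ j ∨ n - 1 ≤ j
instance (i : Int) (j : Int) (n : Int) : Decidable (Pre_get_counterclockwise_routes i j n) := by unfold Pre_get_counterclockwise_routes; infer_instance

def pvWitness_get_counterclockwise_routes : Int × Int × Int := (2, 4, 6)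

def Spec_get_counterclockwise_routes (i : Int) (j : Int) (n : Int) (out : List Int) : Prop := out = get_counterclockwise_routes_alt i j n
instance (i : Int) (j : Int) (n : Int) (out : List Int) : Decidable (Spec_get_counterclockwise_routes i j n out) := by unfold Spec_get_counterclockwise_routes; infer_instance

-- ===== CLAIM (what is proved, stated in full; the proofs are below) =====
def Claim_equal_get_counterclockwise_routes : Prop := ∀ (i : Int) (j : Int) (n : Int), Dom_get_counterclockwise_routes i j n → Pre_get_counterclockwise_routes i j n → Spec_get_counterclockwise_routes i j n (get_counterclockwise_routes i j n)

-- ===== LEMMAS AND PROOFS =====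

theorem pvLoopA1_eq (j : Int) : ∀ (f : Nat) (k : Int) (acc : List Int),
    (k - j).toNat ≤ f →
    pvLoopA1 f k j acc = acc ++ PySem.List.pyRange (k - 1) (j - 1) (-1) := by
  intro f
  induction f with
  | zero =>
    intro k acc h
    rw [PySem.List.pyRange_neg_one_eq_nil (by omega)]
    simp [pvLoopA1]
  | succ f ih =>
    intro k acc h
    by_cases hk : j < k
    · rw [pvLoopA1, if_pos hk, ih (k - 1) _ (by omega),
        PySem.List.pyRange_neg_one_cons (show (j : Int) - 1 < k - 1 by omega)]
      simp
    · rw [PySem.List.pyRange_neg_one_eq_nil (by omega)]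
      simp [pvLoopA1, hk]

theorem pvLoopA2_true (j n : Int) : ∀ (f : Nat) (k : Int) (acc : List Int),
    (0 ≤ j ∨ k ≤ j) → (k - j).toNat ≤ f →
    pvLoopA2 f k j n true acc = acc ++ PySem.List.pyRange (k - 1) (j - 1) (-1) := by
  intro f
  induction f with
  | zero =>
    intro k acc _ h
    rw [PySem.List.pyRange_neg_one_eq_nil (by omega)]
    simp [pvLoopA2]
  | succ f ih =>
    intro k acc hd h
    by_cases hk : j < k
    · have hj : 0 ≤ j := by rcases hd with h0 | h0 <;> omega
      rw [pvLoopA2]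
      simp only [hk, Bool.not_true, Bool.or_false]
      rw [if_pos (by simp), if_neg (show ¬ (k - 1 < 0) by omega),
        ih (k - 1) _ (Or.inl hj) (by omega),
        PySem.List.pyRange_neg_one_cons (show (j : Int) - 1 < k - 1 by omega)]
      simp
    · rw [PySem.List.pyRange_neg_one_eq_nil (by omega)]
      simp [pvLoopA2, hk]

theorem pvLoopA2_false (j n : Int) (hj : 0 ≤ j ∨ n - 1 ≤ j) :
    ∀ (f : Nat) (k : Int) (acc : List Int),
    k ≤ j → k.toNat + (n - 1 - j).toNat + 1 ≤ f →
    pvLoopA2 f k j n false acc =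
      acc ++ PySem.List.pyRange (k - 1) (-1) (-1) ++ [n - 1] ++ PySem.List.pyRange (n - 2) (j - 1) (-1) := by
  intro f
  induction f with
  | zero => intro k acc hk h; omega
  | succ f ih =>
    intro k acc hk h
    rw [pvLoopA2]
    simp only [Bool.not_false, Bool.or_true]
    rw [if_pos (by simp)]
    by_cases hk0 : k - 1 < 0
    · rw [if_pos hk0,
        pvLoopA2_true j n f (n - 1) _ (by omega) (by omega),
        PySem.List.pyRange_neg_one_eq_nil (show k - 1 ≤ (-1 : Int) by omega),
        show (n : Int) - 1 - 1 = n - 2 by ring]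
      simp
    · rw [if_neg hk0, ih (k - 1) _ (by omega) (by omega),
        PySem.List.pyRange_neg_one_cons (show (-1 : Int) < k - 1 by omega)]
      simp

-- ===== VERDICT (by name: the statement is the Claim_ definition above) =====
theorem get_counterclockwise_routes_spec : Claim_equal_get_counterclockwise_routes := by
  intro i j n _ hpre
  unfold Spec_get_counterclockwise_routes get_counterclockwise_routes get_counterclockwise_routes_alt
  by_cases hij : j < i
  · rw [if_pos hij, if_pos hij, pvLoopA1_eq j _ i [] (le_refl _)]
    simp
  · have hd : 0 ≤ j ∨ n - 1 ≤ j := by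
      rcases hpre with h | h | h
      · exact absurd h hij
      · exact Or.inl h
      · exact Or.inr h
    rw [if_neg hij, if_neg hij,
      pvLoopA2_false j n hd _ i [] (by omega) (by omega)]
    simp
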